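-- pv_equiv track=rewrite | github.com/zincdigitalofmiami/warbird-pro | scripts/optuna/warbird_nexus_ml_rsi_profile.py | _canonical_col
-- ===== SOURCE A (Python) =====
-- from typing import Any
--
-- def _canonical_col(name: Any) -> str:
--     col = str(name).strip().lower()
--     for old, new in (
--         (" ", "_"),
--         ("-", "_"),
--         (":", "_"),
--         ("/", "_"),
--         ("(", ""),
--         (")", ""),
--         ("%", "pct"),
--         (".", "_"),
--     ):
--         col = col.replace(old, new)
--     return "_".join(part for part in col.split("_") if part)
-- ===== SOURCE B (Python) =====
-- def _canonical_col(name):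
--     s = str(name).strip().lower()
--     tokens = []
--     buf = ""
--     for ch in s:
--         if ch in " -:/._":
--             if buf:
--                 tokens.append(buf)
--                 buf = ""
--         elif ch in "()":
--             continue
--         elif ch == "%":
--             buf += "pct"
--         else:
--             buf += ch
--     if buf:
--         tokens.append(buf)
--     return "_".join(tokens)
-- ===== Notes on version B (the rewrite author's own statement) =====
-- stated objective: alternative
-- what changed: B replaces A's eight sequential full-string .replace passes plus a split/filter/join pass with a single-pass tokenizer that scans the string once, flushing a token buffer at separators, skipping parentheses and expanding % to pct in place; fewer passes in principle, but CPython's C-level str.replace makes A faster in practice, so no speed is claimed.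
import Mathlib
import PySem

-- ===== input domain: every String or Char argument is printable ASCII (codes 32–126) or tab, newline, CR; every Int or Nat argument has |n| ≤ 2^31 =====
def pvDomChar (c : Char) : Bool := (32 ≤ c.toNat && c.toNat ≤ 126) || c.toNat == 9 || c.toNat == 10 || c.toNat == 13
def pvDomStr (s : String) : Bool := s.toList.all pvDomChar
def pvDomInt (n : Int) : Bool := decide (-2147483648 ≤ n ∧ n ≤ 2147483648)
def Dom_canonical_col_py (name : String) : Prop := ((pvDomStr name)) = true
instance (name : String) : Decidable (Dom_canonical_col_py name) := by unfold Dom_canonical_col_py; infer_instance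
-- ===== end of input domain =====

-- B canonicalizes the column name with a single-pass tokenizer instead of A's eight .replace passes plus split/join (alternative decomposition; no speed claimed).

-- ===== PORT A =====
-- A: strip+lower, then the 8 replace passes (the for-loop over the literal tuple, unrolled), then split on '_', drop empty parts, join.
def canonical_col_py (name : String) : String :=
  let col0 := PySem.Chars.lower (PySem.Chars.strip name.toList)
  let col1 := PySem.Chars.replace col0 [' '] ['_']
  let col2 := PySem.Chars.replace col1 ['-'] ['_']
  let col3 := PySem.Chars.replace col2 [':'] ['_']
  let col4 := PySem.Chars.replace col3 ['/'] ['_']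
  let col5 := PySem.Chars.replace col4 ['('] []
  let col6 := PySem.Chars.replace col5 [')'] []
  let col7 := PySem.Chars.replace col6 ['%'] ['p', 'c', 't']
  let col8 := PySem.Chars.replace col7 ['.'] ['_']
  String.ofList (PySem.Chars.join ['_'] ((PySem.Chars.splitOn col8 ['_']).filter (fun p => !p.isEmpty)))

-- ===== PORT B =====
-- the for-loop of Source B: state = (current buffer, finished tokens)
def pvTokLoop : List Char → List Char → List (List Char) → List (List Char)
  | [], buf, tokens => if buf.isEmpty then tokens else tokens ++ [buf]
  | c :: t, buf, tokens =>
    if c ∈ [' ', '-', ':', '/', '.', '_'] then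
      pvTokLoop t [] (if buf.isEmpty then tokens else tokens ++ [buf])
    else if c ∈ ['(', ')'] then
      pvTokLoop t buf tokens
    else if c = '%' then
      pvTokLoop t (buf ++ ['p', 'c', 't']) tokens
    else
      pvTokLoop t (buf ++ [c]) tokens

def canonical_col_py_alt (name : String) : String :=
  let s := PySem.Chars.lower (PySem.Chars.strip name.toList)
  String.ofList (PySem.Chars.join ['_'] (pvTokLoop s [] []))

-- ===== PRECONDITION & SPEC =====
def Spec_canonical_col_py (name : String) (out : String) : Prop := out = canonical_col_py_alt name
instance (name : String) (out : String) : Decidable (Spec_canonical_col_py name out) := by unfold Spec_canonical_col_py; infer_instance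

-- ===== CLAIM (what is proved, stated in full; the proofs are below) =====
def Claim_equal_canonical_col_py : Prop := ∀ (name : String), Dom_canonical_col_py name → Spec_canonical_col_py name (canonical_col_py name)

-- ===== LEMMAS AND PROOFS =====

-- per-character image of the whole replace chain
def pvImg (c : Char) : List Char :=
  if c ∈ [' ', '-', ':', '/', '.', '_'] then ['_']
  else if c ∈ ['(', ')'] then []
  else if c = '%' then ['p', 'c', 't']
  else [c]

-- split on '_' , head-cons formulation
def pvSplitU : List Char → List (List Char)
  | [] => [[]]
  | c :: t =>
    if c = '_' then [] :: pvSplitU t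
    else
      match pvSplitU t with
      | [] => [[c]]
      | p :: ps => (c :: p) :: ps

def pvMergeHead (b : List Char) : List (List Char) → List (List Char)
  | [] => [b]
  | p :: ps => (b ++ p) :: ps

lemma pvSplitU_ne_nil (l : List Char) : pvSplitU l ≠ [] := by
  cases l with
  | nil => simp [pvSplitU]
  | cons c t =>
    simp only [pvSplitU]
    split
    · simp
    · split <;> simp

lemma pvMergeHead_nil (ls : List (List Char)) (h : ls ≠ []) : pvMergeHead [] ls = ls := by
  cases ls with
  | nil => exact absurd rfl h
  | cons p ps => simp [pvMergeHead]

lemma pvMergeHead_merge (a b : List Char) (ls : List (List Char)) :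
    pvMergeHead a (pvMergeHead b ls) = pvMergeHead (a ++ b) ls := by
  cases ls <;> simp [pvMergeHead]

lemma pvSplitU_append (bs rest : List Char) (h : '_' ∉ bs) :
    pvSplitU (bs ++ rest) = pvMergeHead bs (pvSplitU rest) := by
  induction bs with
  | nil => simp [pvMergeHead_nil _ (pvSplitU_ne_nil rest)]
  | cons c t ih =>
    have hc : c ≠ '_' := by intro hc; exact h (by simp [hc])
    have ht : '_' ∉ t := fun hm => h (List.mem_cons_of_mem _ hm)
    simp only [List.cons_append, pvSplitU, if_neg hc, ih ht]
    cases hrec : pvSplitU rest with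
    | nil => exact absurd hrec (pvSplitU_ne_nil rest)
    | cons p ps => simp [pvMergeHead]

-- single-char replace is a flatMap
lemma pvReplaceGo_single (o : Char) (new : List Char) :
    ∀ (fuel : Nat) (l acc : List Char), l.length ≤ fuel →
      PySem.Chars.replace.go [o] new fuel l acc
        = acc.reverse ++ l.flatMap (fun c => if c = o then new else [c]) := by
  intro fuel
  induction fuel with
  | zero =>
    intro l acc h
    have : l = [] := List.eq_nil_of_length_eq_zero (Nat.le_zero.mp h)
    subst this
    simp [PySem.Chars.replace.go]
  | succ n ih =>
    intro l acc h
    cases l with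
    | nil => simp [PySem.Chars.replace.go]
    | cons c t =>
      rw [PySem.Chars.replace.go]
      by_cases hc : c = o
      · have hpre : List.isPrefixOf [o] (c :: t) = true := by
          simp [List.isPrefixOf, hc]
        rw [if_pos hpre]
        simp only [List.length_cons] at h
        simp only [show ([o]).length = 1 from rfl, List.drop_one, List.tail_cons]
        rw [ih t (new.reverse ++ acc) (Nat.le_of_succ_le_succ h)]
        simp [hc]
      · have hpre : List.isPrefixOf [o] (c :: t) = false := by
          simp [List.isPrefixOf]
          exact fun h' => absurd h'.symm hc
        rw [if_neg (by simp [hpre])]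
        have := ih t (c :: acc) (by simpa using Nat.lt_succ_iff.mp (by simpa using h))
        rw [this]
        simp [hc]

lemma pvReplace_single (l : List Char) (o : Char) (new : List Char) :
    PySem.Chars.replace l [o] new = l.flatMap (fun c => if c = o then new else [c]) := by
  rw [PySem.Chars.replace]
  have : ([o] : List Char).isEmpty = false := rfl
  rw [this, if_neg (by simp)]
  simpa using pvReplaceGo_single o new l.length l [] (Nat.le_refl _)

-- split on '_' via the pure splitter
lemma pvSplitOnGo (fuel : Nat) :
    ∀ (l cur : List Char) (acc : List (List Char)), l.length ≤ fuel →
      PySem.Chars.splitOn.go ['_'] fuel l cur acc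
        = acc.reverse ++ pvMergeHead cur.reverse (pvSplitU l) := by
  induction fuel with
  | zero =>
    intro l cur acc h
    have : l = [] := List.eq_nil_of_length_eq_zero (Nat.le_zero.mp h)
    subst this
    simp [PySem.Chars.splitOn.go, pvSplitU, pvMergeHead]
  | succ n ih =>
    intro l cur acc h
    cases l with
    | nil => simp [PySem.Chars.splitOn.go, pvSplitU, pvMergeHead]
    | cons c t =>
      rw [PySem.Chars.splitOn.go]
      simp only [List.length_cons] at h
      by_cases hc : c = '_'
      · have hpre : List.isPrefixOf ['_'] (c :: t) = true := by simp [List.isPrefixOf, hc]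
        rw [if_pos hpre]
        simp only [show (['_'] : List Char).length = 1 from rfl, List.drop_one, List.tail_cons]
        rw [ih t [] (cur.reverse :: acc) (Nat.le_of_succ_le_succ h)]
        simp only [pvSplitU, hc, if_pos]
        cases hrec : pvSplitU t with
        | nil => exact absurd hrec (pvSplitU_ne_nil t)
        | cons p ps => simp [pvMergeHead]
      · have hpre : List.isPrefixOf ['_'] (c :: t) = false := by
          simp [List.isPrefixOf]
          exact fun h' => absurd h'.symm hc
        rw [if_neg (by simp [hpre])]
        rw [ih t (c :: cur) acc (Nat.le_of_succ_le_succ h)]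
        simp only [pvSplitU, if_neg hc]
        cases hrec : pvSplitU t with
        | nil => exact absurd hrec (pvSplitU_ne_nil t)
        | cons p ps => simp [pvMergeHead]

lemma pvSplitOn_eq (l : List Char) :
    PySem.Chars.splitOn l ['_'] = pvSplitU l := by
  rw [PySem.Chars.splitOn, pvSplitOnGo (l.length + 1) l [] [] (Nat.le_succ _)]
  simp [pvMergeHead_nil _ (pvSplitU_ne_nil l)]

-- the replace chain, pointwise
lemma pvChain_pointwise (c : Char) :
    (((((((((if c = ' ' then ['_'] else [c]).flatMap
      (fun c => if c = '-' then ['_'] else [c])).flatMap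
      (fun c => if c = ':' then ['_'] else [c])).flatMap
      (fun c => if c = '/' then ['_'] else [c])).flatMap
      (fun c => if c = '(' then [] else [c])).flatMap
      (fun c => if c = ')' then [] else [c])).flatMap
      (fun c => if c = '%' then ['p', 'c', 't'] else [c])).flatMap
      (fun c => if c = '.' then ['_'] else [c]))) = pvImg c := by
  by_cases h1 : c = ' '; · subst h1; decide
  by_cases h2 : c = '-'; · subst h2; decide
  by_cases h3 : c = ':'; · subst h3; decide
  by_cases h4 : c = '/'; · subst h4; decide
  by_cases h5 : c = '('; · subst h5; decide
  by_cases h6 : c = ')'; · subst h6; decide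
  by_cases h7 : c = '%'; · subst h7; decide
  by_cases h8 : c = '.'; · subst h8; decide
  by_cases h9 : c = '_'; · subst h9; decide
  simp [pvImg, h1, h2, h3, h4, h5, h6, h7, h8, h9]

lemma pvChain_eq (l : List Char) :
    (((((((((l.flatMap (fun c => if c = ' ' then ['_'] else [c])).flatMap
      (fun c => if c = '-' then ['_'] else [c])).flatMap
      (fun c => if c = ':' then ['_'] else [c])).flatMap
      (fun c => if c = '/' then ['_'] else [c])).flatMap
      (fun c => if c = '(' then [] else [c])).flatMap
      (fun c => if c = ')' then [] else [c])).flatMap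
      (fun c => if c = '%' then ['p', 'c', 't'] else [c])).flatMap
      (fun c => if c = '.' then ['_'] else [c]))) = l.flatMap pvImg := by
  induction l with
  | nil => rfl
  | cons c t ih =>
    simp only [List.flatMap_cons, List.flatMap_append] at *
    rw [ih, pvChain_pointwise c]

-- tokenizer loop vs split-and-filter of the per-character image
lemma pvTokLoop_eq (l : List Char) :
    ∀ (buf : List Char) (tokens : List (List Char)),
      pvTokLoop l buf tokens
        = tokens ++ (pvMergeHead buf (pvSplitU (l.flatMap pvImg))).filter (fun p => !p.isEmpty) := by
  induction l with
  | nil =>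
    intro buf tokens
    cases buf <;> simp [pvTokLoop, pvSplitU, pvMergeHead, List.filter]
  | cons c t ih =>
    intro buf tokens
    rw [pvTokLoop]
    by_cases hsep : c ∈ [' ', '-', ':', '/', '.', '_']
    · rw [if_pos hsep, ih]
      have himg : pvImg c = ['_'] := by rw [pvImg, if_pos hsep]
      simp only [List.flatMap_cons, himg]
      rw [pvMergeHead_nil _ (pvSplitU_ne_nil _)]
      have h2 : pvSplitU (['_'] ++ t.flatMap pvImg) = [] :: pvSplitU (t.flatMap pvImg) := by
        simp [pvSplitU]
      rw [h2]
      cases hb : buf.isEmpty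
      · have : buf ≠ [] := by simpa [List.isEmpty_iff] using hb
        simp [pvMergeHead, hb]
      · have : buf = [] := by simpa [List.isEmpty_iff] using hb
        subst this
        simp [pvMergeHead]
    · rw [if_neg hsep]
      by_cases hpar : c ∈ ['(', ')']
      · rw [if_pos hpar, ih]
        have himg : pvImg c = [] := by rw [pvImg, if_neg hsep, if_pos hpar]
        simp [List.flatMap_cons, himg]
      · rw [if_neg hpar]
        have hcu : c ≠ '_' := by intro h; exact hsep (by simp [h])
        by_cases hpct : c = '%'
        · rw [if_pos hpct, ih]
          have himg : pvImg c = ['p', 'c', 't'] := by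
            rw [pvImg, if_neg hsep, if_neg hpar, if_pos hpct]
          simp only [List.flatMap_cons, himg]
          rw [pvSplitU_append ['p', 'c', 't'] _ (by decide), pvMergeHead_merge]
        · rw [if_neg hpct, ih]
          have himg : pvImg c = [c] := by
            rw [pvImg, if_neg hsep, if_neg hpar, if_neg hpct]
          simp only [List.flatMap_cons, himg]
          rw [pvSplitU_append [c] _ (by simpa using fun h => hcu h.symm), pvMergeHead_merge]

-- ===== VERDICT (by name: the statement is the Claim_ definition above) =====
theorem canonical_col_py_spec : Claim_equal_canonical_col_py := by
  intro name _
  unfold Spec_canonical_col_py canonical_col_py canonical_col_py_alt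
  simp only [pvReplace_single]
  rw [pvChain_eq, pvSplitOn_eq, pvTokLoop_eq]
  rw [pvMergeHead_nil _ (pvSplitU_ne_nil _)]
  simp
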